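-- pv_equiv track=rewrite | github.com/ZDawang/leetcode | 396_Rotate_Function.py | maxRotateFunction3
-- ===== SOURCE A (Python) =====
-- def maxRotateFunction3(A):
--     if not A: return 0
--     l, sums = len(A), sum(A)
--     dp = sum(i * A[i] for i in range(l))
--     res = dp
--     for i in range(1, l):
--         dp += sums - l * A[-i]
--         res = max(res, dp)
--     return res
-- ===== SOURCE B (Python) =====
-- def maxRotateFunction3(A):
--     l = len(A)
--     if l == 0:
--         return 0
--     return max(sum(((i + k) % l) * A[i] for i in range(l)) for k in range(l))
-- ===== Notes on version B (the rewrite author's own statement) =====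
-- stated objective: simpler
-- what changed: B replaces A's incremental dp recurrence F(k)=F(k-1)+sum-n*A[-k] with a direct definition-based computation: for each rotation k it recomputes F(k) = sum(((i+k)%n)*A[i]) from scratch and takes the maximum, carrying no state between rotations.
import Mathlib
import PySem

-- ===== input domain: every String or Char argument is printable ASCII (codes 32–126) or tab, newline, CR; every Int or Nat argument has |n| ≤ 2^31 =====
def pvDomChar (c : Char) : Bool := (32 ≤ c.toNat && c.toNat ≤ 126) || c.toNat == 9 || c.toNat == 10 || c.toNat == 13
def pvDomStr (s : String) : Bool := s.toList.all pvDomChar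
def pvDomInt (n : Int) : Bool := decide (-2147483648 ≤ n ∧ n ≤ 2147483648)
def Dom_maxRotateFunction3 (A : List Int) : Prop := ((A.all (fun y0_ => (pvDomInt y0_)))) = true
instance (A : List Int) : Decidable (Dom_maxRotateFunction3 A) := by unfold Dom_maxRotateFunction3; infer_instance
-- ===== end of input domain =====

-- B replaces A's incremental F(k)=F(k-1)+sum-n*A[-k] recurrence by the direct
-- definition-based maximum over all rotations (simpler, no shared dp state; not faster).

-- ===== PORT A =====
def maxRotateFunction3 (A : List Int) : Int :=
  if A = [] then 0
  else
    let l : Int := A.length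
    let sums : Int := A.sum
    let dp : Int := (PySem.List.pyRange 0 l 1).foldl
      (fun acc i => acc + i * PySem.List.pyGetD A i 0) 0
    let st : Int × Int := (PySem.List.pyRange 1 l 1).foldl
      (fun st i =>
        let dp' := st.1 + (sums - l * PySem.List.pyGetD A (-i) 0)
        (dp', max st.2 dp')) (dp, dp)
    st.2

-- ===== PORT B =====
def maxRotateFunction3_alt (A : List Int) : Int :=
  let l : Int := A.length
  if l = 0 then 0
  else
    (PySem.List.max?
      ((PySem.List.pyRange 0 l 1).map (fun k =>
        (PySem.List.pyRange 0 l 1).foldl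
          (fun acc i => acc + PySem.Int.mod (i + k) l * PySem.List.pyGetD A i 0) 0))
      (fun y => y)).getD 0

-- ===== PRECONDITION & SPEC =====
def Spec_maxRotateFunction3 (A : List Int) (out : Int) : Prop := out = maxRotateFunction3_alt A
instance (A : List Int) (out : Int) : Decidable (Spec_maxRotateFunction3 A out) := by unfold Spec_maxRotateFunction3; infer_instance

-- ===== CLAIM (what is proved, stated in full; the proofs are below) =====
def Claim_equal_maxRotateFunction3 : Prop := ∀ (A : List Int), Dom_maxRotateFunction3 A → Spec_maxRotateFunction3 A (maxRotateFunction3 A)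

-- ===== LEMMAS AND PROOFS =====

-- F(k) in definition form: sum over i of ((i+k) mod n) * A[i]
def gVal (A : List Int) (k : Nat) : Int :=
  ∑ i ∈ Finset.range A.length, (((i + k) % A.length : Nat) : Int) * A.getD i 0

theorem pyRangeOne (n : ℕ) (hn : 0 < n) :
    PySem.List.pyRange 1 (n:Int) 1 = (List.range (n-1)).map (fun j : Nat => (j:Int)+1) := by
  simp only [PySem.List.pyRange]
  norm_num
  rw [show (if 1 < n then n-1 else 0) = n-1 from by split_ifs <;> omega]
  exact List.map_congr_left (fun k _ => by simp [add_comm])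

theorem sum_getD (A : List Int) :
    A.sum = ∑ i ∈ Finset.range A.length, A.getD i 0 := by
  induction A with
  | nil => simp
  | cons a t ih =>
      rw [List.sum_cons, List.length_cons, Finset.sum_range_succ', ih]
      simp [add_comm]

theorem mod_step {n i k : ℕ} (hi : i < n) (hk : k < n) (hne : i ≠ n-1-k) :
    (i+k+1) % n = (i+k) % n + 1 := by
  by_cases h : i + k < n
  · have e1 := Nat.mod_eq_of_lt h
    have e2 : (i+k+1) % n = i+k+1 := Nat.mod_eq_of_lt (by omega)
    omega
  · have e1 : (i+k) % n = i+k-n := by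
      rw [Nat.mod_eq_sub_mod (by omega)]; exact Nat.mod_eq_of_lt (by omega)
    have e2 : (i+k+1) % n = i+k+1-n := by
      rw [Nat.mod_eq_sub_mod (by omega)]; exact Nat.mod_eq_of_lt (by omega)
    omega

theorem mod_step_eq {n k : ℕ} (hk : k < n) :
    ((n-1-k)+k+1) % n = 0 ∧ ((n-1-k)+k) % n = n-1 := by
  constructor
  · rw [show (n-1-k)+k+1 = n from by omega]; exact Nat.mod_self n
  · rw [show (n-1-k)+k = n-1 from by omega]; exact Nat.mod_eq_of_lt (by omega)

theorem g_succ (A : List Int) (k : Nat) (hk : k < A.length) :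
    gVal A (k+1) = gVal A k + A.sum - (A.length : Int) * A.getD (A.length - 1 - k) 0 := by
  have hterm : ∀ i ∈ Finset.range A.length,
      (((i + (k+1)) % A.length : Nat) : Int) * A.getD i 0
      = (((i + k) % A.length : Nat) : Int) * A.getD i 0 + A.getD i 0
        - (if i = A.length - 1 - k then (A.length : Int) * A.getD i 0 else 0) := by
    intro i hi
    rw [Finset.mem_range] at hi
    rw [show i + (k+1) = i + k + 1 from by omega]
    by_cases he : i = A.length - 1 - k
    · subst he
      obtain ⟨e1, e2⟩ := mod_step_eq (n := A.length) hk
      rw [e1, e2, if_pos rfl, Nat.cast_sub (by omega)]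
      push_cast
      ring
    · rw [mod_step hi hk he, if_neg he]
      push_cast
      ring
  rw [gVal, Finset.sum_congr rfl hterm, Finset.sum_sub_distrib, Finset.sum_add_distrib,
    Finset.sum_ite_eq' (Finset.range A.length) (A.length - 1 - k)
      (fun i => (A.length : Int) * A.getD i 0),
    if_pos (Finset.mem_range.mpr (by omega)), ← sum_getD]
  rfl

theorem g_zero (A : List Int) :
    gVal A 0 = ∑ i ∈ Finset.range A.length, (i : Int) * A.getD i 0 := by
  refine Finset.sum_congr rfl (fun i hi => ?_)
  rw [Finset.mem_range] at hi
  rw [Nat.add_zero, Nat.mod_eq_of_lt hi]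

theorem pyGetD_neg (A : List Int) (m : Nat) (h1 : 1 ≤ m) (h2 : m ≤ A.length) :
    PySem.List.pyGetD A (-(m:Int)) 0 = A.getD (A.length - m) 0 := by
  simp only [PySem.List.pyGetD, PySem.List.pyGet?, PySem.List.pyIdx?]
  rw [if_neg (by omega), if_pos (by omega)]
  simp

theorem loopA (A : List Int) (S : Int) (hS : S = A.sum) (m : Nat) (hm : m ≤ A.length - 1)
    (hn : 0 < A.length) :
    (List.range m).foldl
      (fun (st : Int × Int) j =>
        (st.1 + (S - (A.length : Int) * A.getD (A.length - (j+1)) 0),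
         max st.2 (st.1 + (S - (A.length : Int) * A.getD (A.length - (j+1)) 0))))
      (gVal A 0, gVal A 0)
    = (gVal A m, (List.range m).foldl (fun r j => max r (gVal A (j+1))) (gVal A 0)) := by
  induction m with
  | zero => simp
  | succ p ih =>
      rw [List.range_succ, List.foldl_append, List.foldl_append, ih (by omega)]
      have hstep := g_succ A p (by omega)
      simp only [List.foldl_cons, List.foldl_nil]
      rw [show A.length - (p+1) = A.length - 1 - p from by omega]
      have harg : gVal A p + (S - (A.length : Int) * A.getD (A.length - 1 - p) 0) = gVal A (p+1) := by
        rw [hstep, hS]; ring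
      rw [harg]

-- ===== VERDICT (by name: the statement is the Claim_ definition above) =====
theorem altEq (A : List Int) (hn : 0 < A.length) :
    maxRotateFunction3_alt A
    = (List.range (A.length - 1)).foldl (fun r j => max r (gVal A (j+1))) (gVal A 0) := by
  simp only [maxRotateFunction3_alt]
  rw [if_neg (show (A.length : Int) ≠ 0 from by exact_mod_cast hn.ne')]
  simp only [PySem.List.pyRange_zero_natCast, List.map_map, Function.comp_def, List.foldl_map]
  have hF : ∀ k : Nat,
      (List.range A.length).foldl
          (fun (acc : Int) (i : Nat) => acc + PySem.Int.mod ((i : Int) + (k : Int)) (A.length : Int) * PySem.List.pyGetD A (i : Int) 0) 0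
      = gVal A k := by
    intro k
    have h1 : (List.range A.length).foldl
          (fun (acc : Int) (i : Nat) => acc + PySem.Int.mod ((i : Int) + (k : Int)) (A.length : Int) * PySem.List.pyGetD A (i : Int) 0) 0
        = (List.range A.length).foldl
          (fun (acc : Int) (i : Nat) => acc + (((i + k) % A.length : Nat) : Int) * A.getD i 0) 0 := by
      apply PySem.List.foldl_congr_mem
      intro acc i _
      rw [PySem.List.pyGetD_natCast,
        show ((i : Int) + (k : Int)) = ((i + k : Nat) : Int) from by push_cast; ring,
        PySem.Int.mod_natCast]
    rw [h1, PySem.List.foldl_add, zero_add]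
    rfl
  have hmap : (List.range A.length).map
        (fun k : Nat => (List.range A.length).foldl
          (fun (acc : Int) (i : Nat) => acc + PySem.Int.mod ((i : Int) + (k : Int)) (A.length : Int) * PySem.List.pyGetD A (i : Int) 0) 0)
      = (List.range A.length).map (gVal A) :=
    List.map_congr_left (fun k _ => hF k)
  rw [hmap]
  rw [show A.length = (A.length - 1) + 1 from by omega, List.range_succ_eq_map, List.map_cons,
    PySem.List.max?_id_cons, Option.getD_some, List.map_map, List.foldl_map]
  rfl

theorem origEq (A : List Int) (hA : A ≠ []) (hn : 0 < A.length) :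
    maxRotateFunction3 A
    = (List.range (A.length - 1)).foldl (fun r j => max r (gVal A (j+1))) (gVal A 0) := by
  simp only [maxRotateFunction3, if_neg hA]
  have hdp : (PySem.List.pyRange 0 (A.length : Int) 1).foldl
      (fun acc i => acc + i * PySem.List.pyGetD A i 0) 0 = gVal A 0 := by
    rw [PySem.List.pyRange_zero_natCast, List.foldl_map]
    have h1 : (List.range A.length).foldl
          (fun (acc : Int) (i : Nat) => acc + (i : Int) * PySem.List.pyGetD A (i : Int) 0) 0
        = (List.range A.length).foldl
          (fun (acc : Int) (i : Nat) => acc + (i : Int) * A.getD i 0) 0 := by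
      apply PySem.List.foldl_congr_mem
      intro acc i _
      rw [PySem.List.pyGetD_natCast]
    rw [h1, PySem.List.foldl_add, zero_add, g_zero]
    rfl
  rw [hdp, pyRangeOne _ hn, List.foldl_map]
  have h2 : (List.range (A.length - 1)).foldl
        (fun (st : Int × Int) (j : Nat) =>
          (st.1 + (A.sum - (A.length : Int) * PySem.List.pyGetD A (-((j:Int)+1)) 0),
           max st.2 (st.1 + (A.sum - (A.length : Int) * PySem.List.pyGetD A (-((j:Int)+1)) 0))))
        (gVal A 0, gVal A 0)
      = (List.range (A.length - 1)).foldl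
        (fun (st : Int × Int) (j : Nat) =>
          (st.1 + (A.sum - (A.length : Int) * A.getD (A.length - (j+1)) 0),
           max st.2 (st.1 + (A.sum - (A.length : Int) * A.getD (A.length - (j+1)) 0))))
        (gVal A 0, gVal A 0) := by
    apply PySem.List.foldl_congr_mem
    intro acc j hj
    rw [List.mem_range] at hj
    rw [show -((j:Int)+1) = -(((j+1 : Nat) : Int)) from by push_cast; ring,
      pyGetD_neg A (j+1) (by omega) (by omega)]
  rw [h2, loopA A A.sum rfl (A.length - 1) le_rfl hn]

theorem maxRotateFunction3_spec : Claim_equal_maxRotateFunction3 := by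
  intro A _
  unfold Spec_maxRotateFunction3
  by_cases hA : A = []
  · subst hA; rfl
  · have hn : 0 < A.length := List.length_pos_of_ne_nil hA
    rw [origEq A hA hn, altEq A hn]
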